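-- pv_equiv track=rewrite | github.com/LindgeW/MachineTranslation | modules/nmt.py | count_ngram
-- ===== SOURCE A (Python) =====
-- def count_ngram(cand: list, ref: list, n=1) -> int:
--     assert len(cand) != 0 and len(ref) != 0
--
--     total_count = 0
--     for i in range(len(cand) - n + 1):
--         cand_count, ref_count = 1, 0
--         ngram = cand[i: i + n]
--         # 统计ngram在机器翻译译文中出现的次数
--         for j in range(i + n, len(cand) - n + 1):
--             if ngram == cand[j: j + n]:
--                 cand_count += 1
--         # 统计ngram在人工译文中出现的次数
--         for k in range(len(ref) - n + 1):
--             if ngram == ref[k: k + n]: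
--                 ref_count += 1
--         total_count += min(cand_count, ref_count)
--
--     return total_count
-- ===== SOURCE B (Python) =====
-- def count_ngram(cand: list, ref: list, n=1) -> int:
--     assert len(cand) != 0 and len(ref) != 0
--     L = len(cand)
--     # reference n-gram counts, built once
--     ref_counts = {}
--     for k in range(len(ref) - n + 1):
--         g = tuple(ref[k:k + n])
--         ref_counts[g] = ref_counts.get(g, 0) + 1
--     # walk candidate positions right-to-left, maintaining counts of the
--     # n-grams that start at least n positions to the right
--     suffix = {}
--     total = 0
--     for i in range(L - n, -1, -1):
--         if i + n <= L - n:
--             g2 = tuple(cand[i + n:i + 2 * n])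
--             suffix[g2] = suffix.get(g2, 0) + 1
--         g = tuple(cand[i:i + n])
--         total += min(1 + suffix.get(g, 0), ref_counts.get(g, 0))
--     return total
-- ===== Notes on version B (the rewrite author's own statement) =====
-- stated objective: faster
-- what changed: Replaces A's per-position rescans of candidate and reference by two hash-map counter passes: reference n-gram counts are built once, and candidate suffix-occurrence counts are maintained incrementally while walking the candidate right-to-left.
-- outside the precondition, e.g. on count_ngram(['a', 'b'], ['a', 'b'], -1): A returns 10, B returns 9
import Mathlib
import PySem

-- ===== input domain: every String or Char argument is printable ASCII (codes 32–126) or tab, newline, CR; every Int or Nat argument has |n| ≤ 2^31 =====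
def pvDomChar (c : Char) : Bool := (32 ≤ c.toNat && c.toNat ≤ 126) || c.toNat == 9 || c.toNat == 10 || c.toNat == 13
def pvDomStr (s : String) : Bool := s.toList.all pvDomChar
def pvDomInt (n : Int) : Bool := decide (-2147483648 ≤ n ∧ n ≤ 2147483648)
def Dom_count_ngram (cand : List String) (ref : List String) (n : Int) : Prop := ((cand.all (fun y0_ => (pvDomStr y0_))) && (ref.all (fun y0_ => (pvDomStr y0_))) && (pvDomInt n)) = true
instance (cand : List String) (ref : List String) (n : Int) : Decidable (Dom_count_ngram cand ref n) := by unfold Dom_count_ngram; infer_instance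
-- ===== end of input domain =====

-- B replaces A's per-position rescans by two hash-map counter passes (reference counts built once,
-- candidate suffix counts maintained right-to-left); objective: faster.


-- ===== PORT A =====
-- body of A's outer loop (total_count accumulator; the two inner scans)
def pvBodyA (cand ref : List String) (n : Int) (total : Int) (i : Int) : Int :=
  let ngram := PySem.List.slice cand (some i) (some (i + n))
  let cand_count := (PySem.List.pyRange (i + n) ((cand.length : Int) - n + 1) 1).foldl
      (fun acc j => if ngram == PySem.List.slice cand (some j) (some (j + n)) then acc + 1 else acc) 1
  let ref_count := (PySem.List.pyRange 0 ((ref.length : Int) - n + 1) 1).foldl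
      (fun acc k => if ngram == PySem.List.slice ref (some k) (some (k + n)) then acc + 1 else acc) 0
  total + min cand_count ref_count

def count_ngram (cand : List String) (ref : List String) (n : Int) : Int :=
  (PySem.List.pyRange 0 ((cand.length : Int) - n + 1) 1).foldl (pvBodyA cand ref n) 0

-- ===== PORT B =====
-- Source B's first loop: reference n-gram counts, built once
def pvRefCounts (ref : List String) (n : Int) : PySem.Dict (List String) Int :=
  (PySem.List.pyRange 0 ((ref.length : Int) - n + 1) 1).foldl
    (fun d k =>
      let g := PySem.List.slice ref (some k) (some (k + n))
      d.insert g (d.getD g 0 + 1)) PySem.Dict.empty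

-- Source B's second-loop body: state = (suffix dict, total)
def pvBodyB (cand : List String) (n L : Int) (rc : PySem.Dict (List String) Int)
    (st : PySem.Dict (List String) Int × Int) (i : Int) : PySem.Dict (List String) Int × Int :=
  let s1 := if i + n ≤ L - n then
      let g2 := PySem.List.slice cand (some (i + n)) (some (i + 2 * n))
      st.1.insert g2 (st.1.getD g2 0 + 1)
    else st.1
  let g := PySem.List.slice cand (some i) (some (i + n))
  (s1, st.2 + min (1 + s1.getD g 0) (rc.getD g 0))

def count_ngram_alt (cand : List String) (ref : List String) (n : Int) : Int :=
  ((PySem.List.pyRange ((cand.length : Int) - n) (-1) (-1)).foldl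
      (pvBodyB cand n (cand.length : Int) (pvRefCounts ref n))
      (PySem.Dict.empty, 0)).2

-- ===== PRECONDITION & SPEC =====
-- cand ≠ [] / ref ≠ [] are A's assert (AssertionError otherwise). Pre_ also excludes n ≤ 0, which is
-- outside the natural domain of an n-gram order: A still returns values there, but they arise from
-- Python's negative-slice wraparound and are not a meaningful clipped n-gram count.
def Pre_count_ngram (cand : List String) (ref : List String) (n : Int) : Prop :=
  cand ≠ [] ∧ ref ≠ [] ∧ 1 ≤ n
instance (cand : List String) (ref : List String) (n : Int) : Decidable (Pre_count_ngram cand ref n) := by unfold Pre_count_ngram; infer_instance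
def pvWitness_count_ngram : List String × List String × Int := (["a", "b"], ["a"], 1)
def Spec_count_ngram (cand : List String) (ref : List String) (n : Int) (out : Int) : Prop := out = count_ngram_alt cand ref n
instance (cand : List String) (ref : List String) (n : Int) (out : Int) : Decidable (Spec_count_ngram cand ref n out) := by unfold Spec_count_ngram; infer_instance

-- ===== CLAIM (what is proved, stated in full; the proofs are below) =====
def Claim_equal_count_ngram : Prop := ∀ (cand : List String) (ref : List String) (n : Int), Dom_count_ngram cand ref n → Pre_count_ngram cand ref n → Spec_count_ngram cand ref n (count_ngram cand ref n)

-- ===== LEMMAS AND PROOFS =====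

-- the n-gram of xs starting at position i
def pvKey (xs : List String) (n i : Int) : List String := PySem.List.slice xs (some i) (some (i + n))

-- number of positions p with a ≤ p < b whose n-gram equals g (Int-valued)
def pvCnt (xs : List String) (n a b : Int) (g : List String) : Int :=
  ((PySem.List.pyRange a b 1).countP (fun j => pvKey xs n j == g) : Int)

-- the per-position summand both programs add up
def pvF (cand ref : List String) (n i : Int) : Int :=
  min (1 + pvCnt cand n (i + n) ((cand.length : Int) - n + 1) (pvKey cand n i))
      (pvCnt ref n 0 ((ref.length : Int) - n + 1) (pvKey cand n i))

theorem cnt_flip (xs : List String) (n a b : Int) (g : List String) (c : Int) :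
    (PySem.List.pyRange a b 1).foldl
      (fun acc j => if g == PySem.List.slice xs (some j) (some (j + n)) then acc + 1 else acc) c
      = c + pvCnt xs n a b g := by
  rw [PySem.List.foldl_if_add_one]
  congr 2
  apply List.countP_congr
  intro j _
  simp only [pvKey, beq_iff_eq]
  exact eq_comm

theorem bodyA_eq (cand ref : List String) (n total i : Int) :
    pvBodyA cand ref n total i = total + pvF cand ref n i := by
  unfold pvBodyA
  simp only [cnt_flip]
  simp only [pvF, pvKey, zero_add]

theorem pvA_char (cand ref : List String) (n : Int) :
    count_ngram cand ref n =
      ((PySem.List.pyRange 0 ((cand.length : Int) - n + 1) 1).map (pvF cand ref n)).sum := by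
  unfold count_ngram
  rw [PySem.List.foldl_congr_mem _ (pvBodyA cand ref n) (fun total i => total + pvF cand ref n i) 0
      (fun acc x _ => bodyA_eq cand ref n acc x)]
  rw [PySem.List.foldl_add]
  simp

theorem cnt_nil (xs : List String) (n a b : Int) (g : List String) (h : b ≤ a) :
    pvCnt xs n a b g = 0 := by
  simp [pvCnt, PySem.List.pyRange_one_eq_nil h]

theorem cnt_cons (xs : List String) (n a b : Int) (g : List String) (h : a < b) :
    pvCnt xs n a b g = (if pvKey xs n a == g then 1 else 0) + pvCnt xs n (a + 1) b g := by
  simp only [pvCnt, PySem.List.pyRange_one_cons h, List.countP_cons]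
  split <;> push_cast <;> omega

theorem rc_getD (ref : List String) (n : Int) (g : List String) :
    (pvRefCounts ref n).getD g 0 = pvCnt ref n 0 ((ref.length : Int) - n + 1) g := by
  unfold pvRefCounts
  rw [show (PySem.List.pyRange 0 ((ref.length : Int) - n + 1) 1).foldl
        (fun (d : PySem.Dict (List String) Int) (k : Int) =>
          let g := PySem.List.slice ref (some k) (some (k + n))
          d.insert g (d.getD g 0 + 1)) PySem.Dict.empty
      = ((PySem.List.pyRange 0 ((ref.length : Int) - n + 1) 1).map (pvKey ref n)).foldl
        (fun (d : PySem.Dict (List String) Int) (x : List String) =>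
          d.insert x (d.getD x 0 + 1)) PySem.Dict.empty
    by exact (List.foldl_map (f := pvKey ref n)
      (g := fun (d : PySem.Dict (List String) Int) (x : List String) =>
        d.insert x (d.getD x 0 + 1))
      (l := PySem.List.pyRange 0 ((ref.length : Int) - n + 1) 1)
      (init := PySem.Dict.empty)).symm]
  rw [PySem.Dict.getD_foldl_insert_add_one]
  simp [pvCnt, List.count, List.countP_map, Function.comp_def]

theorem step_inv (cand : List String) (n L i : Int)
    (d : PySem.Dict (List String) Int)
    (hd : ∀ g, d.getD g 0 = pvCnt cand n (i + n + 1) (L - n + 1) g) :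
    ∀ g, (if i + n ≤ L - n then
        d.insert (PySem.List.slice cand (some (i + n)) (some (i + 2 * n)))
          (d.getD (PySem.List.slice cand (some (i + n)) (some (i + 2 * n))) 0 + 1)
      else d).getD g 0 = pvCnt cand n (i + n) (L - n + 1) g := by
  intro g
  have hkey : PySem.List.slice cand (some (i + n)) (some (i + 2 * n)) = pvKey cand n (i + n) := by
    simp [pvKey]; ring_nf
  split
  · rename_i hle
    rw [hkey, PySem.Dict.getD_insert, cnt_cons cand n (i + n) (L - n + 1) g (by omega)]
    by_cases hg : g = pvKey cand n (i + n)
    · simp [hg, hd, add_comm]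
    · have hb : (pvKey cand n (i + n) == g) = false := by
        simp only [beq_eq_false_iff_ne, ne_eq]
        exact fun h => hg h.symm
      simp [hg, hb, hd]
  · rename_i hgt
    rw [hd, cnt_nil _ _ _ _ _ (by omega), cnt_nil _ _ _ _ _ (by omega)]

theorem pvCnt_ext (xs : List String) (n : Int) {a a' b b' : Int} (ha : a = a') (hb : b = b')
    (g : List String) : pvCnt xs n a b g = pvCnt xs n a' b' g := by rw [ha, hb]

theorem loopB (cand ref : List String) (n : Int) :
    ∀ (i : Nat) (d : PySem.Dict (List String) Int) (t : Int),
      (∀ g, d.getD g 0 = pvCnt cand n ((i : Int) + n + 1) ((cand.length : Int) - n + 1) g) →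
      ((PySem.List.pyRange (i : Int) (-1) (-1)).foldl
          (pvBodyB cand n (cand.length : Int) (pvRefCounts ref n)) (d, t)).2
        = t + ((PySem.List.pyRange 0 ((i : Int) + 1) 1).map (pvF cand ref n)).sum := by
  intro i
  induction i with
  | zero =>
    intro d t hd
    simp only [Nat.cast_zero] at hd ⊢
    rw [PySem.List.pyRange_neg_one_cons (by omega : (-1:Int) < 0),
        PySem.List.pyRange_neg_one_eq_nil (by omega : (0:Int) - 1 ≤ -1)]
    have hs := step_inv cand n (cand.length : Int) 0 d
      (fun g => (hd g).trans (pvCnt_ext _ _ (by ring) rfl g))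
    simp only [List.foldl_cons, List.foldl_nil, pvBodyB]
    rw [hs, rc_getD]
    rw [PySem.List.pyRange_one_cons (by omega : (0:Int) < 0 + 1),
        PySem.List.pyRange_one_eq_nil (by omega : (0:Int) + 1 ≤ 0 + 1)]
    simp [pvF, pvKey]
  | succ k ih =>
    intro d t hd
    have hcast : ((k + 1 : Nat) : Int) = (k : Int) + 1 := by push_cast; ring
    rw [hcast]
    rw [PySem.List.pyRange_neg_one_cons (by omega : (-1:Int) < (k : Int) + 1)]
    have hs := step_inv cand n (cand.length : Int) ((k : Int) + 1) d
      (fun g => (hd g).trans (pvCnt_ext _ _ (by push_cast; ring) rfl g))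
    simp only [List.foldl_cons, pvBodyB]
    rw [show (k : Int) + 1 - 1 = (k : Int) by ring]
    rw [ih _ _ (fun g => (hs g).trans (pvCnt_ext _ _ (by ring) rfl g))]
    rw [hs, rc_getD]
    rw [PySem.List.pyRange_one_succ_right (by omega : (0:Int) ≤ (k : Int) + 1)]
    simp only [List.map_append, List.sum_append, List.map_cons, List.map_nil, List.sum_cons,
      List.sum_nil]
    simp [pvF, pvKey]
    ring

theorem pvB_char (cand ref : List String) (n : Int) (hn : 1 ≤ n) :
    count_ngram_alt cand ref n =
      ((PySem.List.pyRange 0 ((cand.length : Int) - n + 1) 1).map (pvF cand ref n)).sum := by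
  unfold count_ngram_alt
  by_cases hm : (cand.length : Int) - n < 0
  · rw [PySem.List.pyRange_neg_one_eq_nil (by omega), PySem.List.pyRange_one_eq_nil (by omega)]
    simp
  · push Not at hm
    obtain ⟨i, hi⟩ : ∃ i : Nat, (i : Int) = (cand.length : Int) - n :=
      ⟨((cand.length : Int) - n).toNat, Int.toNat_of_nonneg hm⟩
    rw [← hi]
    rw [loopB cand ref n i PySem.Dict.empty 0
      (fun g => by
        rw [cnt_nil cand n ((i : Int) + n + 1) ((cand.length : Int) - n + 1) g (by omega)]
        simp [PySem.Dict.getD_empty])]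
    simp

-- ===== VERDICT (by name: the statement is the Claim_ definition above) =====
theorem count_ngram_spec : Claim_equal_count_ngram := by
  intro cand ref n _ hpre
  unfold Spec_count_ngram
  rw [pvA_char, pvB_char cand ref n hpre.2.2]
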